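-- pv_equiv track=rewrite | github.com/Nordicade/AdventOfCode2024 | Day1/Day1.py | partTwo
-- ===== SOURCE A (Python) =====
-- def partTwo(leftList, rightList):
--     # convert right to map and increment for frequency
--     # use left list as key and sum = index + rightMap[index]
--     rightMap = {}
--     for val in rightList:
--         if val in rightMap:
--             rightMap[val] = rightMap[val] + 1
--         else:
--             rightMap[val] = 1
--
--     sum = 0
--     for val in leftList:
--         if val in rightMap:
--             sum = sum + val * rightMap[val]
--
--     return sum
-- ===== SOURCE B (Python) =====
-- def partTwo(leftList, rightList):
--     # Sort both lists, then one merge-style two-pointer sweep multiplying run lengths.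
--     L = sorted(leftList)
--     R = sorted(rightList)
--     i = j = 0
--     total = 0
--     while i < len(L) and j < len(R):
--         if L[i] < R[j]:
--             i += 1
--         elif R[j] < L[i]:
--             j += 1
--         else:
--             v = L[i]
--             a = 0
--             while i < len(L) and L[i] == v:
--                 a += 1
--                 i += 1
--             b = 0
--             while j < len(R) and R[j] == v:
--                 b += 1
--                 j += 1
--             total += v * a * b
--     return total
-- ===== Notes on version B (the rewrite author's own statement) =====
-- stated objective: alternative
-- what changed: B replaces A's hash-map frequency count with sort-then-merge: both lists are sorted and a single two-pointer sweep multiplies matching run lengths (val * leftRun * rightRun), using no dictionary at all.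
import Mathlib
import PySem

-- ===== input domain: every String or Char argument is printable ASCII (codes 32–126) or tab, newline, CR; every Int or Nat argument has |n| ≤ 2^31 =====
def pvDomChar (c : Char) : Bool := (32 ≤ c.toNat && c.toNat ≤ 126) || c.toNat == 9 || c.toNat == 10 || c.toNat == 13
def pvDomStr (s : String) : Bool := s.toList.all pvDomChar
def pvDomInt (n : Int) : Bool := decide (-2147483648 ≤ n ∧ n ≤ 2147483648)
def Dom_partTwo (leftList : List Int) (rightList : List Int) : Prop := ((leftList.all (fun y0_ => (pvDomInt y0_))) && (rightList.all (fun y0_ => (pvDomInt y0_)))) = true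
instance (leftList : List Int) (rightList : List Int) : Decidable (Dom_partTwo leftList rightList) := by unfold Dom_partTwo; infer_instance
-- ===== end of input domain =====

-- B replaces A's frequency map with sort-then-merge: both lists sorted, one
-- two-pointer sweep multiplying matching run lengths (alternative algorithm).


-- ===== PORT A =====
def partTwo (leftList : List Int) (rightList : List Int) : Int :=
  let rightMap : PySem.Dict Int Int :=
    rightList.foldl
      (fun d val =>
        if d.contains val then d.insert val (d.getD val 0 + 1) else d.insert val 1)
      PySem.Dict.empty
  leftList.foldl
    (fun s val => if rightMap.contains val then s + val * rightMap.getD val 0 else s)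
    0

-- ===== PORT B =====
-- The merge sweep: the recursion over suffixes is B's two-pointer while loop
-- (i/j advance = taking the tail), the inner run-counting whiles are the
-- 1 + takeWhile lengths, and the run remainders are the dropWhile suffixes.
def pvMerge : List Int → List Int → Int
  | [], _ => 0
  | _ :: _, [] => 0
  | x :: L, y :: R =>
    if x < y then pvMerge L (y :: R)
    else if y < x then pvMerge (x :: L) R
    else
      let a : Int := 1 + (L.takeWhile (· == x)).length
      let b : Int := 1 + (R.takeWhile (· == x)).length
      x * a * b + pvMerge (L.dropWhile (· == x)) (R.dropWhile (· == x))
termination_by L R => L.length + R.length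
decreasing_by all_goals
  (have h1 := List.length_dropWhile_le (· == x) L
   have h2 := List.length_dropWhile_le (· == x) R
   simp
   try omega)

def partTwo_alt (leftList : List Int) (rightList : List Int) : Int :=
  pvMerge (PySem.List.sorted leftList (fun v => v) false)
          (PySem.List.sorted rightList (fun v => v) false)

-- ===== PRECONDITION & SPEC =====
def Spec_partTwo (leftList : List Int) (rightList : List Int) (out : Int) : Prop := out = partTwo_alt leftList rightList
instance (leftList : List Int) (rightList : List Int) (out : Int) : Decidable (Spec_partTwo leftList rightList out) := by unfold Spec_partTwo; infer_instance

-- ===== CLAIM =====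
def Claim_equal_partTwo : Prop := ∀ (leftList : List Int) (rightList : List Int), Dom_partTwo leftList rightList → Spec_partTwo leftList rightList (partTwo leftList rightList)

-- ===== LEMMAS AND PROOFS =====

-- A's branching counter loop is the plain insert/getD counter loop (the else-branch
-- inserts 1 = getD + 1 when the key is absent), hence builds Counter(rightList).
theorem countLoop_eq_counter (xs : List Int) (d : PySem.Dict Int Int) :
    xs.foldl
      (fun d val =>
        if d.contains val then d.insert val (d.getD val 0 + 1) else d.insert val 1) d
    = xs.foldl (fun d v => d.insert v (d.getD v 0 + 1)) d := by
  induction xs generalizing d with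
  | nil => rfl
  | cons x t ih =>
    simp only [List.foldl_cons]
    by_cases h : d.contains x = true
    · rw [if_pos h]; exact ih _
    · have h0 : d.getD x 0 = 0 :=
        PySem.Dict.getD_of_not_contains d 0 (by simpa using h)
      rw [if_neg h, h0, zero_add]
      exact ih _

-- A computes the sum over leftList of v * (multiplicity of v in rightList).
theorem partTwo_eq_sum (leftList rightList : List Int) :
    partTwo leftList rightList
      = (leftList.map (fun v => v * (rightList.count v : Int))).sum := by
  unfold partTwo
  rw [countLoop_eq_counter, PySem.Dict.foldl_insert_getD_add_one_eq_counter]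
  have hstep : ∀ (s v : Int),
      (if (PySem.Dict.counter rightList).contains v then
        s + v * (PySem.Dict.counter rightList).getD v 0 else s)
      = s + v * (rightList.count v : Int) := by
    intro s v
    by_cases h : (PySem.Dict.counter rightList).contains v = true
    · rw [if_pos h, PySem.Dict.getD_counter]
    · rw [if_neg h]
      have hv : v ∉ rightList := by
        simpa [PySem.Dict.contains_counter] using h
      simp [List.count_eq_zero_of_not_mem hv]
  calc leftList.foldl
        (fun s val => if (PySem.Dict.counter rightList).contains val then
          s + val * (PySem.Dict.counter rightList).getD val 0 else s) 0
      = leftList.foldl (fun s v => s + v * (rightList.count v : Int)) 0 := by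
        exact PySem.List.foldl_congr_mem _ _ _ _ (fun acc x _ => hstep acc x)
    _ = (leftList.map (fun v => v * (rightList.count v : Int))).sum := by
        rw [PySem.List.foldl_add]; simp

-- In a nondecreasing list whose elements are all ≥ x, everything past the
-- leading run of x's is strictly greater than x.
theorem dropWhile_gt (x : Int) (L : List Int)
    (hL : L.Pairwise (· ≤ ·)) (hge : ∀ v ∈ L, x ≤ v) :
    ∀ v ∈ L.dropWhile (· == x), x < v := by
  induction L with
  | nil => simp
  | cons h t ih =>
    by_cases hh : h = x
    · subst hh
      rw [List.dropWhile_cons_of_pos (by simp)]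
      exact ih (List.pairwise_cons.mp hL).2 (fun v hv => hge v (List.mem_cons_of_mem _ hv))
    · rw [List.dropWhile_cons_of_neg (by simpa using hh)]
      intro v hv
      have hxh : x < h := lt_of_le_of_ne (hge h (List.mem_cons_self)) (Ne.symm hh)
      rcases List.mem_cons.mp hv with rfl | hvt
      · exact hxh
      · exact lt_of_lt_of_le hxh ((List.pairwise_cons.mp hL).1 v hvt)

-- The merge sweep on sorted lists computes the similarity sum.
theorem merge_eq_sum : ∀ (L R : List Int),
    L.Pairwise (· ≤ ·) → R.Pairwise (· ≤ ·) →
    pvMerge L R = (L.map (fun v => v * (R.count v : Int))).sum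
  | [], _, _, _ => by simp [pvMerge]
  | x :: L, [], _, _ => by
    simp [pvMerge, List.count_nil]
  | x :: L, y :: R, hL, hR => by
    rw [pvMerge]
    by_cases hxy : x < y
    · rw [if_pos hxy]
      have hnotmem : x ∉ y :: R := by
        intro hmem
        rcases List.mem_cons.mp hmem with rfl | hmR
        · omega
        · exact absurd ((List.pairwise_cons.mp hR).1 x hmR) (by omega)
      rw [merge_eq_sum L (y :: R) (List.pairwise_cons.mp hL).2 hR]
      simp [List.count_eq_zero_of_not_mem hnotmem]
    · rw [if_neg hxy]
      by_cases hyx : y < x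
      · rw [if_pos hyx]
        rw [merge_eq_sum (x :: L) R hL (List.pairwise_cons.mp hR).2]
        apply congrArg List.sum
        apply List.map_congr_left
        intro v hv
        have hvy : y < v := by
          rcases List.mem_cons.mp hv with rfl | hvL
          · exact hyx
          · exact lt_of_lt_of_le hyx ((List.pairwise_cons.mp hL).1 v hvL)
        rw [List.count_cons_of_ne (by omega)]
      · rw [if_neg hyx]
        have hxeq : x = y := by omega
        subst hxeq
        have hLtail := (List.pairwise_cons.mp hL).2
        have hRtail := (List.pairwise_cons.mp hR).2
        have hgeL : ∀ v ∈ L, x ≤ v := (List.pairwise_cons.mp hL).1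
        have hgeR : ∀ v ∈ R, x ≤ v := (List.pairwise_cons.mp hR).1
        have hdLgt := dropWhile_gt x L hLtail hgeL
        have hdRgt := dropWhile_gt x R hRtail hgeR
        have htLeq : ∀ v ∈ L.takeWhile (· == x), v = x := by
          intro v hv; simpa using List.mem_takeWhile_imp hv
        have htReq : ∀ v ∈ R.takeWhile (· == x), v = x := by
          intro v hv; simpa using List.mem_takeWhile_imp hv
        -- count of x in the whole right list = 1 + length of its leading run
        have hcntR : ((x :: R).count x : Int)
            = 1 + (R.takeWhile (· == x)).length := by
          have hsplit : R = R.takeWhile (· == x) ++ R.dropWhile (· == x) :=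
            (List.takeWhile_append_dropWhile).symm
          have h1 : (R.takeWhile (· == x)).count x = (R.takeWhile (· == x)).length :=
            List.count_eq_length.mpr (fun b hb => (htReq b hb).symm)
          have h2 : (R.dropWhile (· == x)).count x = 0 :=
            List.count_eq_zero_of_not_mem (fun hmem => absurd (hdRgt x hmem) (by omega))
          rw [List.count_cons_self]
          conv_lhs => rw [hsplit]
          push_cast [List.count_append, h1, h2]
          ring
        have hrec := merge_eq_sum (L.dropWhile (· == x)) (R.dropWhile (· == x))
          (hLtail.sublist (List.dropWhile_sublist _))
          (hRtail.sublist (List.dropWhile_sublist _))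
        rw [hrec]
        -- decompose the left sum along x :: takeWhile ++ dropWhile
        have hsplitL : L = L.takeWhile (· == x) ++ L.dropWhile (· == x) :=
          (List.takeWhile_append_dropWhile).symm
        conv_rhs => rw [hsplitL]
        rw [List.map_cons, List.map_append, List.sum_cons, List.sum_append]
        have hrun : ((L.takeWhile (· == x)).map
            (fun v => v * (((x :: R).count v : Nat) : Int))).sum
            = ((L.takeWhile (· == x)).length : Int)
                * (x * (1 + (R.takeWhile (· == x)).length)) := by
          rw [List.sum_eq_card_nsmul _ (x * (1 + ((R.takeWhile (· == x)).length : Int)))]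
          · simp
          · intro v hv
            rcases List.mem_map.mp hv with ⟨w, hw, rfl⟩
            rw [htLeq w hw, hcntR]
        have hrest : ((L.dropWhile (· == x)).map
            (fun v => v * (((x :: R).count v : Nat) : Int))).sum
            = ((L.dropWhile (· == x)).map
                (fun v => v * (((R.dropWhile (· == x)).count v : Nat) : Int))).sum := by
          apply congrArg List.sum
          apply List.map_congr_left
          intro v hv
          have hvgt : x < v := hdLgt v hv
          have hsplit : R = R.takeWhile (· == x) ++ R.dropWhile (· == x) :=
            (List.takeWhile_append_dropWhile).symm
          have h1 : (R.takeWhile (· == x)).count v = 0 :=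
            List.count_eq_zero_of_not_mem
              (fun hmem => absurd (htReq v hmem) (by omega))
          rw [List.count_cons_of_ne (by omega)]
          conv_lhs => rw [hsplit]
          rw [List.count_append, h1]
          simp
        rw [hrun, hrest, hcntR]
        ring
termination_by L R => L.length + R.length
decreasing_by all_goals
  (have h1 := List.length_dropWhile_le (· == x) L
   have h2 := List.length_dropWhile_le (· == x) R
   simp
   try omega)

-- The similarity sum is invariant under sorting either list.
theorem sum_sorted_eq (leftList rightList : List Int) :
    ((PySem.List.sorted leftList (fun v => v) false).map
      (fun v => v * ((PySem.List.sorted rightList (fun v => v) false).count v : Int))).sum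
    = (leftList.map (fun v => v * (rightList.count v : Int))).sum := by
  have hpL := PySem.List.sorted_perm leftList (fun v => v) false
  have hpR := PySem.List.sorted_perm rightList (fun v => v) false
  calc ((PySem.List.sorted leftList (fun v => v) false).map
          (fun v => v * ((PySem.List.sorted rightList (fun v => v) false).count v : Int))).sum
      = ((PySem.List.sorted leftList (fun v => v) false).map
          (fun v => v * (rightList.count v : Int))).sum := by
        apply congrArg List.sum
        apply List.map_congr_left
        intro v _
        rw [hpR.count_eq]
    _ = (leftList.map (fun v => v * (rightList.count v : Int))).sum :=
        (hpL.map _).sum_eq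

-- ===== VERDICT =====
theorem partTwo_spec : Claim_equal_partTwo := by
  intro leftList rightList _
  unfold Spec_partTwo partTwo_alt
  rw [merge_eq_sum _ _
        (by simpa using PySem.List.sorted_pairwise leftList (fun v => v))
        (by simpa using PySem.List.sorted_pairwise rightList (fun v => v)),
      sum_sorted_eq, partTwo_eq_sum]
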